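-- pv_equiv track=rewrite | github.com/shtota/ExplainableClustering | utils.py | smart_inverse
-- ===== SOURCE A (Python) =====
-- def smart_inverse(x):
--     if x is None:
--         return "None"
--     x = x[::-1]
--     new = list(x)
--     in_number = False
--     start = 0
--     for i, char in enumerate(x):
--         if in_number:
--             if char.isalpha() or char == ' ':
--                 in_number = False
--                 new[start:i] = new[i-1:start-1:-1]
--         else:
--             if not char.isalpha() and char != ' ':
--                 in_number = True
--                 start = i
--     return ''.join(new)
-- ===== SOURCE B (Python) =====
-- from itertools import groupby
--
--
-- def smart_inverse(x):
--     if x is None: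
--         return "None"
--     # split into maximal runs of number chars (non-alpha, non-space) vs text,
--     # then emit the runs back-to-front: text runs reversed, number runs intact
--     out = []
--     for is_num, group in groupby(x, key=lambda c: not c.isalpha() and c != ' '):
--         seg = ''.join(group)
--         out.append(seg if is_num else seg[::-1])
--     return ''.join(reversed(out))
-- ===== Notes on version B (the rewrite author's own statement) =====
-- stated objective: simpler
-- what changed: B splits the string once into maximal number/text runs with itertools.groupby and concatenates them back-to-front (text runs reversed, number runs intact), instead of A's in-place index/slice surgery over the reversed character list.
-- intended difference: On strings that end in a number char (non-alpha, non-space) while containing a letter or space, A silently deletes the trailing number run (its slice new[i-1:start-1:-1] with start=0 is empty), and on strings whose leading number run is not its own reverse, A emits that run reversed (it is never flushed at the end of the loop); B keeps both runs intact in place, which is the intended number-preserving reversal. — e.g. on smart_inverse(some "a1"): A returns "a", B returns "1a"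
import Mathlib
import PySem

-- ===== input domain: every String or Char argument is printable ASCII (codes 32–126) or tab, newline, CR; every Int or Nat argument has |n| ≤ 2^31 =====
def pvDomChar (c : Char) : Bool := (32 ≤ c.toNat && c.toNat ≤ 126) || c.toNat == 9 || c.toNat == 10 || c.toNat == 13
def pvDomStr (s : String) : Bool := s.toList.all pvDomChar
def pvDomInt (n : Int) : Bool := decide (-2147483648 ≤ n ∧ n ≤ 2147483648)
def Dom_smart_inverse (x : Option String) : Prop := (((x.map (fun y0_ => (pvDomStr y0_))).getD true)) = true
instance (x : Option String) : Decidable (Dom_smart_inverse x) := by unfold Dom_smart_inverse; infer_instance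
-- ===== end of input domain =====

-- B rebuilds the reversal from maximal number/text runs instead of A's in-place slice surgery;
-- A and B differ only on strings whose first or last character is a number char (D_ below).

-- shared character predicate: Python `not c.isalpha() and c != ' '` ("number" character)
def isNumC (c : Char) : Bool := !(PySem.Chars.isalpha c) && !(c == ' ')

-- ===== PORT A =====
-- hand-port of the Python statement `new[start:i] = new[i-1:start-1:-1]` (no stepped slices
-- in PySem); exact for 0 ≤ start ≤ i as produced by A's loop: when start = 0 the right-hand
-- slice new[i-1:-1:-1] is EMPTY (stop -1 means len-1), so the assignment deletes new[0:i];
-- when start ≥ 1 it is the reversal of new[start:i], with Python's clamping of both slices.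
def pyRevSlice (new : List Char) (start i : Int) : List Char :=
  if start = 0 then new.drop i.toNat
  else new.take start.toNat ++ ((new.drop start.toNat).take (i.toNat - start.toNat)).reverse
        ++ new.drop i.toNat

-- A's loop body; state = (new, in_number, start)
def stepA (st : List Char × Bool × Int) (ic : Int × Char) : List Char × Bool × Int :=
  if st.2.1 then
    if PySem.Chars.isalpha ic.2 || ic.2 == ' ' then
      (pyRevSlice st.1 st.2.2 ic.1, false, st.2.2)
    else st
  else
    if !(PySem.Chars.isalpha ic.2) && !(ic.2 == ' ') then (st.1, true, ic.1)
    else st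

def smart_inverse (x : Option String) : String :=
  match x with
  | none => "None"
  | some s =>
    let xs := s.toList.reverse        -- x = x[::-1]
    String.mk ((PySem.List.enumerate xs 0).foldl stepA (xs, false, 0)).1

-- ===== PORT B =====
-- port of itertools.groupby(x, key = λ c, not c.isalpha() and c != ' '): maximal runs with key
def consGroup (c : Char) : List (Bool × List Char) → List (Bool × List Char)
  | [] => [(isNumC c, [c])]
  | (k, g) :: rest =>
      if isNumC c == k then (k, c :: g) :: rest else (isNumC c, [c]) :: (k, g) :: rest

def groupRuns : List Char → List (Bool × List Char)
  | [] => []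
  | c :: cs => consGroup c (groupRuns cs)

def smart_inverse_alt (x : Option String) : String :=
  match x with
  | none => "None"
  | some s =>
    let out := (groupRuns s.toList).map (fun p => if p.1 then p.2 else p.2.reverse)
    String.mk out.reverse.flatten

-- ===== PRECONDITION & SPEC =====
-- On strings whose LAST character is a number char (non-alpha, non-space) while some character
-- is a letter/space, A's slice new[i-1:start-1:-1] runs with start = 0 and is empty, so A
-- silently DELETES the trailing number run; on strings whose leading number run is not its own
-- reverse, A never flushes that run (it reaches the end of the reversed string) and emits it
-- reversed. B keeps both runs intact in place, the intended number-preserving reversal.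
def dCond (x : Option String) : Bool :=
  let l := (x.getD "").toList
  let n := fun c : Char => !c.isAlpha && c != ' '
  (l.reverse.takeWhile n != [] && l.any fun c => c.isAlpha || c == ' ')
    || (l.takeWhile n).reverse != l.takeWhile n

def D_smart_inverse (x : Option String) : Prop := dCond x = true
instance (x : Option String) : Decidable (D_smart_inverse x) := by
  unfold D_smart_inverse; infer_instance

def Spec_smart_inverse (x : Option String) (out : String) : Prop :=
  ¬ D_smart_inverse x → out = smart_inverse_alt x
instance (x : Option String) (out : String) : Decidable (Spec_smart_inverse x out) := by
  unfold Spec_smart_inverse; infer_instance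

def pvDiffWitness_smart_inverse : Option String := some "a1"
def pvDiffWitnessOut_smart_inverse : String × String := ("a", "1a")

-- ===== CLAIM (what is proved, stated in full; the proofs are below) =====
def Claim_unchanged_smart_inverse : Prop :=
  ∀ (x : Option String), Dom_smart_inverse x → Spec_smart_inverse x (smart_inverse x)
def Claim_changed_smart_inverse : Prop :=
  Dom_smart_inverse (pvDiffWitness_smart_inverse) ∧ D_smart_inverse (pvDiffWitness_smart_inverse) ∧
  smart_inverse (pvDiffWitness_smart_inverse) = pvDiffWitnessOut_smart_inverse.1 ∧
  smart_inverse_alt (pvDiffWitness_smart_inverse) = pvDiffWitnessOut_smart_inverse.2 ∧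
  pvDiffWitnessOut_smart_inverse.1 ≠ pvDiffWitnessOut_smart_inverse.2

-- ===== LEMMAS AND PROOFS =====

theorem alpha_eq (c : Char) : c.isAlpha = PySem.Chars.isalpha c := by
  simp only [Char.isAlpha, Char.isLower, Char.isUpper, PySem.Chars.isalpha,
    PySem.Chars.isupper, PySem.Chars.islower, Char.le_def, ge_iff_le, Bool.decide_and]

theorem numB_eq : (fun c : Char => !c.isAlpha && c != ' ') = isNumC := by
  funext c
  rw [isNumC, alpha_eq]
  rfl

-- proof-side vocabulary
def flipSeg (p : Bool × List Char) : List Char := if p.1 then p.2.reverse else p.2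
def keepNum (p : Bool × List Char) : List Char := if p.1 then p.2 else p.2.reverse
def revGroup (p : Bool × List Char) : Bool × List Char := (p.1, p.2.reverse)

-- the value A's loop produces, expressed over the runs of the (already reversed) string:
-- every run except the last is flipped when it is a number run; the last run is left alone
def fRuns : List (Bool × List Char) → List Char
  | [] => []
  | [p] => p.2
  | p :: q :: rest => flipSeg p ++ fRuns (q :: rest)

theorem consGroup_ne_nil (c : Char) (rs : List (Bool × List Char)) : consGroup c rs ≠ [] := by
  cases rs with
  | nil => simp [consGroup]
  | cons r rest => obtain ⟨k, g⟩ := r; simp only [consGroup]; split <;> simp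

theorem fRuns_cons (p : Bool × List Char) (rs : List (Bool × List Char)) (h : rs ≠ []) :
    fRuns (p :: rs) = flipSeg p ++ fRuns rs := by
  cases rs with
  | nil => exact absurd rfl h
  | cons q rest => rfl

theorem groupRuns_allnum (l : List Char) (h : ∀ c ∈ l, isNumC c = true) (hne : l ≠ []) :
    groupRuns l = [(true, l)] := by
  induction l with
  | nil => exact absurd rfl hne
  | cons c cs ih =>
    cases cs with
    | nil => simp [groupRuns, consGroup, h c (by simp)]
    | cons c' cs' =>
      have h2 : groupRuns (c' :: cs') = [(true, c' :: cs')] :=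
        ih (fun d hd => h d (List.mem_cons_of_mem _ hd)) (by simp)
      show consGroup c (groupRuns (c' :: cs')) = _
      rw [h2, consGroup, if_pos (by simp [h c List.mem_cons_self])]

theorem fRuns_groupRuns_allnum (l : List Char) (h : ∀ c ∈ l, isNumC c = true) :
    fRuns (groupRuns l) = l := by
  cases hl : l with
  | nil => simp [groupRuns, fRuns]
  | cons c cs =>
    rw [← hl, groupRuns_allnum l h (by simp [hl])]; rfl

theorem consGroup_head (c : Char) (rs : List (Bool × List Char)) :
    ∃ g rest, consGroup c rs = (isNumC c, g) :: rest := by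
  cases rs with
  | nil => exact ⟨[c], [], rfl⟩
  | cons r rest =>
    obtain ⟨k, g⟩ := r
    by_cases h : isNumC c = k
    · subst h; exact ⟨c :: g, rest, by simp [consGroup]⟩
    · refine ⟨[c], (k, g) :: rest, ?_⟩
      simp [consGroup, h]

theorem lem1 (c : Char) (cs : List Char) (hc : isNumC c = false) :
    fRuns (groupRuns (c :: cs)) = c :: fRuns (groupRuns cs) := by
  show fRuns (consGroup c (groupRuns cs)) = _
  cases hg : groupRuns cs with
  | nil => simp [consGroup, fRuns, hc]
  | cons r rest =>
    obtain ⟨k, g⟩ := r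
    by_cases h : isNumC c = k
    · subst h
      rw [consGroup, if_pos (by simp)]
      cases rest with
      | nil => simp [fRuns]
      | cons q t =>
        rw [fRuns_cons (isNumC c, c :: g) (q :: t) (by simp),
            fRuns_cons (isNumC c, g) (q :: t) (by simp)]
        simp [flipSeg, hc]
    · rw [consGroup, if_neg (by simp [h])]
      rw [fRuns_cons (isNumC c, [c]) ((k, g) :: rest) (by simp)]
      simp [flipSeg, hc]

theorem gr2 (pending : List Char) (c : Char) (cs : List Char)
    (hne : pending ≠ []) (hall : ∀ d ∈ pending, isNumC d = true) (hc : isNumC c = false) :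
    groupRuns (pending ++ c :: cs) = (true, pending) :: groupRuns (c :: cs) := by
  induction pending with
  | nil => exact absurd rfl hne
  | cons p ps ih =>
    have hp : isNumC p = true := hall p (by simp)
    cases ps with
    | nil =>
      obtain ⟨g, rest, hg⟩ := consGroup_head c (groupRuns cs)
      show consGroup p (consGroup c (groupRuns cs)) = (true, [p]) :: consGroup c (groupRuns cs)
      rw [hg, consGroup, if_neg (by simp [hp, hc]), hp]
    | cons q qs =>
      have := ih (by simp) (fun d hd => hall d (by simp [hd]))
      show consGroup p (groupRuns ((q :: qs) ++ c :: cs)) = _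
      rw [this, consGroup, if_pos (by simp [hp])]

theorem lem2 (pending : List Char) (c : Char) (cs : List Char)
    (hne : pending ≠ []) (hall : ∀ d ∈ pending, isNumC d = true) (hc : isNumC c = false) :
    fRuns (groupRuns (pending ++ c :: cs)) = pending.reverse ++ c :: fRuns (groupRuns cs) := by
  rw [gr2 pending c cs hne hall hc]
  have hne2 : groupRuns (c :: cs) ≠ [] := consGroup_ne_nil c (groupRuns cs)
  rw [fRuns_cons (true, pending) _ hne2, lem1 c cs hc]
  simp [flipSeg]

-- the characterisation of A's loop (run with the invariant: new = done ++ pending ++ suffix,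
-- in_number ↔ pending ≠ [], start = |done| while in a run; safety: if done = [] and the
-- remaining text starts with a number char then it is ALL number chars)
theorem coreA (suffix : List Char) : ∀ (done pending : List Char) (start : Int),
    (∀ c ∈ pending, isNumC c = true) →
    (pending ≠ [] → start = (done.length : Int)) →
    (done = [] → ∀ c, (pending ++ suffix).head? = some c → isNumC c = true →
        ∀ d ∈ pending ++ suffix, isNumC d = true) →
    ((PySem.List.enumerate suffix ((done.length + pending.length : Nat) : Int)).foldl stepA
        (done ++ (pending ++ suffix), !pending.isEmpty, start)).1
      = done ++ fRuns (groupRuns (pending ++ suffix)) := by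
  induction suffix with
  | nil =>
    intro done pending start hall _ _
    simp only [PySem.List.enumerate_nil, List.foldl_nil, List.append_nil]
    rw [fRuns_groupRuns_allnum pending hall]
  | cons c cs ih =>
    intro done pending start hall hstart hsafe
    rw [PySem.List.enumerate_cons, List.foldl_cons]
    by_cases hc : isNumC c = true
    · -- c is a number character
      have hcond : (!(PySem.Chars.isalpha c) && !(c == ' ')) = true := hc
      cases pending with
      | nil =>
        -- enter a run: in_number := true, start := i
        have hstep : stepA (done ++ ([] ++ c :: cs), !([] : List Char).isEmpty, start)
            (((done.length + ([] : List Char).length : Nat) : Int), c)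
            = (done ++ ([c] ++ cs), !([c] : List Char).isEmpty,
               ((done.length : Nat) : Int)) := by
          simp [stepA, hcond]
        rw [hstep]
        have := ih done [c] ((done.length : Nat) : Int)
          (by intro d hd; simp at hd; subst hd; exact hc)
          (by intro _; simp)
          (by intro h0 d hd hnum e he
              exact hsafe h0 d (by simpa using hd) hnum e (by simpa using he))
        simpa using this
      | cons p ps =>
        -- already in a run: state unchanged
        have hstep : stepA (done ++ ((p :: ps) ++ c :: cs), !((p :: ps) : List Char).isEmpty, start)
            (((done.length + (p :: ps).length : Nat) : Int), c)
            = (done ++ ((p :: ps) ++ c :: cs), !((p :: ps) : List Char).isEmpty, start) := by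
          have hterm : (PySem.Chars.isalpha c || c == ' ') = false := by
            revert hc; unfold isNumC; cases PySem.Chars.isalpha c <;> cases (c == ' ') <;> simp
          simp [stepA, hterm]
        rw [hstep]
        have := ih done ((p :: ps) ++ [c]) start
          (by intro d hd
              rcases List.mem_append.1 hd with h | h
              · exact hall d h
              · simp at h; subst h; exact hc)
          (by intro _; exact hstart (by simp))
          (by intro h0 d hd hnum e he
              refine hsafe h0 d ?_ hnum e (by simpa using he)
              rcases (p :: ps) ++ [c] ++ cs with _ | _ <;> simpa using hd)
        have harr : ((p :: ps) ++ [c]) ++ cs = (p :: ps) ++ c :: cs := by simp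
        rw [harr] at this
        have hlen : ((done.length + ((p :: ps) ++ [c]).length : Nat) : Int)
            = ((done.length + (p :: ps).length : Nat) : Int) + 1 := by
          simp; ring
        rw [hlen] at this
        simpa using this
    · -- c is alpha or space
      have hc' : isNumC c = false := by revert hc; cases h : isNumC c <;> simp
      have hcond : (!(PySem.Chars.isalpha c) && !(c == ' ')) = false := hc'
      have hterm : (PySem.Chars.isalpha c || c == ' ') = true := by
        revert hc'; unfold isNumC; cases PySem.Chars.isalpha c <;> cases (c == ' ') <;> simp
      cases pending with
      | nil =>
        -- not in a run: state unchanged, c joins the done prefix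
        have hstep : stepA (done ++ ([] ++ c :: cs), !([] : List Char).isEmpty, start)
            (((done.length + ([] : List Char).length : Nat) : Int), c)
            = (done ++ ([] ++ c :: cs), false, start) := by
          simp [stepA, hcond]
        rw [hstep]
        have := ih (done ++ [c]) [] start (by simp) (by simp)
          (by intro h0; exact absurd h0 (by simp))
        have harr : (done ++ [c]) ++ ([] ++ cs) = done ++ ([] ++ c :: cs) := by simp
        rw [harr] at this
        have hlen : (((done ++ [c]).length + ([] : List Char).length : Nat) : Int)
            = ((done.length + ([] : List Char).length : Nat) : Int) + 1 := by
          simp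
        rw [hlen] at this
        simp only [List.isEmpty_nil, Bool.not_true] at this
        rw [this]
        simp only [List.nil_append]
        rw [lem1 c cs hc']
        simp
      | cons p ps =>
        -- run terminates: flip new[start:i] in place
        have hdone : done ≠ [] := by
          intro h0
          have hp : isNumC p = true := hall p (by simp)
          have := hsafe h0 p (by simp) hp c (by simp)
          rw [this] at hc'; cases hc'
        have hst : start = (done.length : Int) := hstart (by simp)
        have hrev : pyRevSlice (done ++ ((p :: ps) ++ c :: cs)) start
            (((done.length + (p :: ps).length : Nat) : Int))
            = done ++ ((p :: ps).reverse ++ c :: cs) := by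
          subst hst
          rw [pyRevSlice, if_neg (by simp [List.length_eq_zero_iff, hdone])]
          have h1 : ((done.length : Int)).toNat = done.length := by omega
          have h2 : (((done.length + (p :: ps).length : Nat) : Int)).toNat
              = done.length + (p :: ps).length := by omega
          rw [h1, h2]
          rw [List.take_left, List.drop_left]
          have h3 : done ++ ((p :: ps) ++ c :: cs) = (done ++ (p :: ps)) ++ c :: cs := by simp
          rw [h3]
          have h4 : done.length + (p :: ps).length = (done ++ (p :: ps)).length := by simp
          rw [h4, List.drop_left]
          have h5 : done.length + (p :: ps).length - done.length = (p :: ps).length := by omega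
          rw [← h4, h5, List.take_left]
          simp
        have hstep : stepA (done ++ ((p :: ps) ++ c :: cs), !((p :: ps) : List Char).isEmpty, start)
            (((done.length + (p :: ps).length : Nat) : Int), c)
            = (done ++ ((p :: ps).reverse ++ c :: cs), false, start) := by
          simp only [stepA, List.isEmpty_cons, Bool.not_false, if_pos, hterm]
          rw [hrev]
        rw [hstep]
        have := ih (done ++ (p :: ps).reverse ++ [c]) [] start (by simp) (by simp)
          (by intro h0; exact absurd h0 (by simp))
        have harr : (done ++ (p :: ps).reverse ++ [c]) ++ ([] ++ cs)
            = done ++ ((p :: ps).reverse ++ c :: cs) := by simp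
        rw [harr] at this
        have hlen : (((done ++ (p :: ps).reverse ++ [c]).length + ([] : List Char).length : Nat) : Int)
            = ((done.length + (p :: ps).length : Nat) : Int) + 1 := by
          simp; ring
        rw [hlen] at this
        simp only [List.isEmpty_nil, Bool.not_true] at this
        rw [this]
        simp only [List.nil_append]
        rw [lem2 (p :: ps) c cs (by simp) hall hc']
        simp

-- ===== B-side characterisation =====

-- appending one char to a run list
def snocG : List (Bool × List Char) → Char → List (Bool × List Char)
  | [], c => [(isNumC c, [c])]
  | [(k, g)], c => if isNumC c == k then [(k, g ++ [c])] else [(k, g), (isNumC c, [c])]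
  | r :: r' :: rest, c => r :: snocG (r' :: rest) c

theorem consGroup_snocG (d : Char) (rs : List (Bool × List Char)) (c : Char) :
    consGroup d (snocG rs c) = snocG (consGroup d rs) c := by
  induction rs with
  | nil =>
    cases hc : isNumC c <;> cases hd : isNumC d <;> simp [snocG, consGroup, hc, hd]
  | cons r rest ih =>
    obtain ⟨k, g⟩ := r
    cases rest with
    | nil =>
      cases hc : isNumC c <;> cases hd : isNumC d <;> cases k <;>
        simp [snocG, consGroup, hc, hd]
    | cons r' rest' =>
      by_cases h2 : (isNumC d == k) = true
      · simp only [snocG, consGroup, if_pos h2]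
      · simp only [snocG, consGroup, if_neg h2]

theorem groupRuns_snoc (l : List Char) (c : Char) :
    groupRuns (l ++ [c]) = snocG (groupRuns l) c := by
  induction l with
  | nil => rfl
  | cons d l ih =>
    show consGroup d (groupRuns (l ++ [c])) = _
    rw [ih, consGroup_snocG]
    rfl

theorem snocG_append (ys : List (Bool × List Char)) (k : Bool) (g : List Char) (c : Char) :
    snocG (ys ++ [(k, g)]) c
      = ys ++ (if isNumC c == k then [(k, g ++ [c])] else [(k, g), (isNumC c, [c])]) := by
  induction ys with
  | nil => rfl
  | cons y ys ih =>
    cases ys with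
    | nil => show y :: snocG [(k, g)] c = _; rw [snocG]; simp
    | cons y' ys' =>
      show y :: snocG ((y' :: ys') ++ [(k, g)]) c = _
      rw [ih]
      simp

theorem groupRuns_reverse (l : List Char) :
    groupRuns l.reverse = ((groupRuns l).map revGroup).reverse := by
  induction l with
  | nil => rfl
  | cons c l ih =>
    rw [List.reverse_cons, groupRuns_snoc, ih]
    show _ = ((consGroup c (groupRuns l)).map revGroup).reverse
    cases hg : groupRuns l with
    | nil => rfl
    | cons r rest =>
      obtain ⟨k, g⟩ := r
      rw [List.map_cons, List.reverse_cons]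
      simp only [revGroup]
      rw [snocG_append]
      by_cases h : isNumC c = k
      · rw [consGroup, if_pos (by simp [h]), if_pos (by simp [h])]
        simp [revGroup]
      · rw [consGroup, if_neg (by simp [h]), if_neg (by simp [h])]
        simp [revGroup]

theorem fRuns_append_singleton (ys : List (Bool × List Char)) (p : Bool × List Char) :
    fRuns (ys ++ [p]) = (ys.map flipSeg).flatten ++ p.2 := by
  induction ys with
  | nil => rfl
  | cons y ys ih =>
    rw [List.cons_append, fRuns_cons _ _ (by simp), ih]
    simp

theorem flipSeg_revGroup (p : Bool × List Char) : flipSeg (revGroup p) = keepNum p := by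
  obtain ⟨k, g⟩ := p; cases k <;> simp [flipSeg, revGroup, keepNum]

-- B's port over the run list, in proof vocabulary
theorem altEq (s : String) :
    smart_inverse_alt (some s)
      = String.mk (((groupRuns s.toList).map keepNum).reverse.flatten) := by
  rfl

-- the first group of groupRuns is the maximal run of characters sharing the head's key
theorem groupRuns_first (c : Char) (cs : List Char) :
    ∃ rest, groupRuns (c :: cs)
      = (isNumC c, (c :: cs).takeWhile (fun d => isNumC d == isNumC c)) :: rest := by
  induction cs generalizing c with
  | nil => exact ⟨[], by simp [groupRuns, consGroup, List.takeWhile]⟩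
  | cons d ds ih =>
    obtain ⟨rest', hrest'⟩ := ih d
    by_cases h : isNumC c = isNumC d
    · refine ⟨rest', ?_⟩
      show consGroup c (groupRuns (d :: ds)) = _
      rw [hrest', consGroup, if_pos (by simp [h])]
      have hpc : List.takeWhile (fun e => isNumC e == isNumC c) (c :: d :: ds)
          = c :: List.takeWhile (fun e => isNumC e == isNumC d) (d :: ds) := by
        rw [List.takeWhile_cons, if_pos (by simp), h]
      rw [hpc, h]
    · refine ⟨groupRuns (d :: ds), ?_⟩
      show consGroup c (groupRuns (d :: ds)) = _
      rw [hrest', consGroup, if_neg (by simp [h]), ← hrest']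
      have hone : List.takeWhile (fun e => isNumC e == isNumC c) (c :: d :: ds) = [c] := by
        rw [List.takeWhile_cons, if_pos (by simp), List.takeWhile_cons,
            if_neg (by simp only [beq_iff_eq]; exact fun he => h he.symm)]
      rw [hone]

-- outside D_, the last run of the reversed string (= the original leading run) is either a text
-- run or a palindromic number run, so A's leaving it unflushed agrees with B's keeping it intact
theorem fRuns_eq_alt (s : String)
    (hhead : ∀ c cs, s.toList = c :: cs → isNumC c = true →
        ((c :: cs).takeWhile isNumC).reverse = (c :: cs).takeWhile isNumC) :
    fRuns (groupRuns s.toList.reverse)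
      = ((groupRuns s.toList).map keepNum).reverse.flatten := by
  cases hl : s.toList with
  | nil => simp [groupRuns, fRuns]
  | cons c cs =>
    obtain ⟨rest, hg⟩ := groupRuns_first c cs
    rw [groupRuns_reverse, hg, List.map_cons, List.reverse_cons, fRuns_append_singleton]
    have hmm : List.map flipSeg (List.reverse (List.map revGroup rest))
        = List.reverse (List.map keepNum rest) := by
      rw [← List.map_reverse, List.map_map, ← List.map_reverse]
      congr 1
      funext p
      exact flipSeg_revGroup p
    rw [hmm, List.map_cons, List.reverse_cons, List.flatten_append]
    cases hk : isNumC c with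
    | false => simp [revGroup, keepNum, hk]
    | true =>
      have htw : ((c :: cs).takeWhile (fun d => isNumC d == true))
          = (c :: cs).takeWhile isNumC := by
        congr 1
        funext d
        simp
      have hpal := hhead c cs hl hk
      simp only [revGroup, keepNum, htw, if_true, List.flatten_cons, List.flatten_nil,
        List.append_nil]
      rw [hpal]

-- ===== VERDICT (by name: the statement is the Claim_ definition above) =====
theorem smart_inverse_spec : Claim_unchanged_smart_inverse := by
  intro x _ hD
  cases x with
  | none => rfl
  | some s =>
    have hcd : dCond (some s) = false := by
      revert hD; unfold D_smart_inverse; cases dCond (some s) <;> simp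
    simp only [dCond, Option.getD_some] at hcd
    rw [numB_eq] at hcd
    rw [Bool.or_eq_false_iff, Bool.and_eq_false_iff] at hcd
    obtain ⟨hA, hB⟩ := hcd
    -- hA: the trailing run never gets flushed with start = 0
    have hsafe : ∀ c, (s.toList.reverse).head? = some c → isNumC c = true →
        ∀ d ∈ s.toList.reverse, isNumC d = true := by
      intro c hc hnum d hd
      have hne : s.toList.reverse.takeWhile isNumC ≠ [] := by
        cases hrev : s.toList.reverse with
        | nil => rw [hrev] at hc; cases hc
        | cons c' tl =>
          rw [hrev] at hc
          have : c' = c := by simpa using hc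
          subst this
          rw [List.takeWhile_cons, if_pos hnum]
          simp
      rcases hA with h | h
      · exact absurd (by simpa using h) hne
      · have h2 := List.any_eq_false.1 h d (List.mem_reverse.1 hd)
        rw [isNumC, ← alpha_eq]
        revert h2; cases d.isAlpha <;> cases (d == ' ') <;> simp
    -- hB: the leading run of the original is its own reverse (or a text run starts the string)
    have hhead : ∀ c cs, s.toList = c :: cs → isNumC c = true →
        ((c :: cs).takeWhile isNumC).reverse = (c :: cs).takeWhile isNumC := by
      intro c cs hl _
      rw [← hl]
      simpa using hB
    have hcore := coreA (s.toList.reverse) [] [] 0 (by simp) (by simp)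
      (by intro _ c hc hnum d hd; exact hsafe c (by simpa using hc) hnum d (by simpa using hd))
    have hcore' : ((PySem.List.enumerate (s.toList.reverse) 0).foldl stepA
        (s.toList.reverse, false, 0)).1 = fRuns (groupRuns (s.toList.reverse)) := by
      simpa using hcore
    show String.mk _ = _
    rw [altEq, ← fRuns_eq_alt s hhead]
    exact congrArg String.mk hcore'

theorem smart_inverse_changed : Claim_changed_smart_inverse := by
  unfold Claim_changed_smart_inverse; decide
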